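-- pv_equiv track=rewrite | github.com/Zinko5/umsa | juezPatito/java/src/a.py | contarGrafosConexos
-- ===== SOURCE A (Python) =====
-- def esPrimo(num):
--     if num < 2:
--         return False
--     if num in (2, 3):
--         return True
--     if num % 2 == 0 or num % 3 == 0:
--         return False
--     i = 5
--     while i * i <= num:
--         if num % i == 0 or num % (i + 2) == 0:
--             return False
--         i += 6
--     return True
--
-- def contarGrafosConexos(minimo, maximo):
--     nodos = list(range(minimo, maximo + 1))
--     grafo = {nodo: set() for nodo in nodos}
--
--     for i in nodos:
--         for j in nodos:
--             if i < j and esPrimo(i + j):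
--                 grafo[i].add(j)
--                 grafo[j].add(i)
--
--     visitados = set()
--     componentesConexas = 0
--
--     def dfs(nodo):
--         pila = [nodo]
--         while pila:
--             n = pila.pop()
--             for vecino in grafo[n]:
--                 if vecino not in visitados:
--                     visitados.add(vecino)
--                     pila.append(vecino)
--
--     for nodo in nodos:
--         if nodo not in visitados:
--             visitados.add(nodo)
--             componentesConexas += 1
--             dfs(nodo)
--
--     return componentesConexas
-- ===== SOURCE B (Python) =====
-- def esPrimo(num):
--     if num < 2:
--         return False
--     if num in (2, 3):
--         return True
--     if num % 2 == 0 or num % 3 == 0: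
--         return False
--     i = 5
--     while i * i <= num:
--         if num % i == 0 or num % (i + 2) == 0:
--             return False
--         i += 6
--     return True
--
-- def contarGrafosConexos(minimo, maximo):
--     # label-merging disjoint sets: one pass over the pairs, no graph, no DFS
--     nodos = list(range(minimo, maximo + 1))
--     comp = {n: n for n in nodos}
--     for idx in range(len(nodos)):
--         j = nodos[idx]
--         for i in nodos[:idx]:
--             if esPrimo(i + j):
--                 a, b = comp[i], comp[j]
--                 if a != b:
--                     for k in nodos:
--                         if comp[k] == b:
--                             comp[k] = a
--     return len(set(comp.values()))
-- ===== Notes on version B (the rewrite author's own statement) =====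
-- stated objective: alternative
-- what changed: Replaces A's adjacency-dict construction plus stack-based DFS component sweep by a disjoint-set label-merging pass: one scan over the node pairs that merges labels on a prime-sum edge, returning the number of distinct final labels.
import Mathlib
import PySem

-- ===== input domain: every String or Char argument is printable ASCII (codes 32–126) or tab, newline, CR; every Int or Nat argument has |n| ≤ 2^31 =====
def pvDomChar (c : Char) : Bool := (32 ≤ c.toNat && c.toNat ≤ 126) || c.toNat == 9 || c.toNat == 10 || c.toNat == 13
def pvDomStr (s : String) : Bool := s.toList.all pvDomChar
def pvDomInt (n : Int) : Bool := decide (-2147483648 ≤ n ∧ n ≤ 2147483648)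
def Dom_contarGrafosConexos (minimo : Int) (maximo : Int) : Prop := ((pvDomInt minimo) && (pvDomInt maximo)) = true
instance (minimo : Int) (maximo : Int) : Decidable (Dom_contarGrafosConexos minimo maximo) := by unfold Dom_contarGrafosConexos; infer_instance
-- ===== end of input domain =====

-- B replaces A's adjacency-dict + stack-DFS component sweep by a disjoint-set label-merging pass
-- over the node pairs (objective: alternative algorithm, same exact result).


-- ===== PORT A =====
-- esPrimo: shared module helper (used verbatim by both A and B, as in the Python files)
def esPrimoLoop (num : Int) (i : Int) : Bool :=
  if h : 5 ≤ i ∧ i * i ≤ num then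
    if PySem.Int.mod num i == 0 || PySem.Int.mod num (i + 2) == 0 then false
    else esPrimoLoop num (i + 6)
  else true
termination_by (num - i).toNat
decreasing_by
  obtain ⟨h5, hle⟩ := h
  have : i < i * i := by nlinarith
  omega

def esPrimo (num : Int) : Bool :=
  if num < 2 then false
  else if num == 2 || num == 3 then true
  else if PySem.Int.mod num 2 == 0 || PySem.Int.mod num 3 == 0 then false
  else esPrimoLoop num 5

def pvNodos (minimo maximo : Int) : List Int := PySem.List.pyRange minimo (maximo + 1) 1

-- grafo = {nodo: set() for nodo in nodos}, then the double edge loop (grafo[i].add(j); grafo[j].add(i))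
def pvGrafoPairStep (g : PySem.Dict Int (PySem.Set Int)) (i j : Int) :
    PySem.Dict Int (PySem.Set Int) :=
  if i < j && esPrimo (i + j) then
    PySem.Dict.modify (PySem.Dict.modify g i PySem.Set.empty (fun s => PySem.Set.add s j))
      j PySem.Set.empty (fun s => PySem.Set.add s i)
  else g

def pvGrafo (minimo maximo : Int) : PySem.Dict Int (PySem.Set Int) :=
  let nodos := pvNodos minimo maximo
  let g0 : PySem.Dict Int (PySem.Set Int) :=
    nodos.foldl (fun d n => d.insert n PySem.Set.empty) PySem.Dict.empty
  nodos.foldl (fun g i => nodos.foldl (fun g j => pvGrafoPairStep g i j) g) g0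

-- dfs while-loop; the stack top is the list head (Python appends and pops at the same end);
-- fuel is a totality guard only (never exhausted: each iteration pops one entry and every
-- push marks a fresh node visited)
def pvDfs (g : PySem.Dict Int (PySem.Set Int)) : Nat → List Int → PySem.Set Int → PySem.Set Int
  | _, [], vis => vis
  | 0, _ :: _, vis => vis
  | fuel + 1, n :: rest, vis =>
      let st := (PySem.Dict.getD g n PySem.Set.empty).foldl
        (fun (pv : List Int × PySem.Set Int) vecino =>
          if PySem.Set.contains pv.2 vecino then pv
          else (vecino :: pv.1, PySem.Set.add pv.2 vecino)) (rest, vis)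
      pvDfs g fuel st.1 st.2

def contarGrafosConexos (minimo : Int) (maximo : Int) : Int :=
  let nodos := pvNodos minimo maximo
  let grafo := pvGrafo minimo maximo
  (nodos.foldl (fun (vc : PySem.Set Int × Int) nodo =>
    if PySem.Set.contains vc.1 nodo then vc
    else (pvDfs grafo (nodos.length + 1) [nodo] (PySem.Set.add vc.1 nodo), vc.2 + 1))
    (PySem.Set.empty, 0)).2

-- ===== PORT B =====
-- relabel every node whose label is b to a  (for k in nodos: if comp[k] == b: comp[k] = a)
def pvMerge (nodos : List Int) (a b : Int) (comp : PySem.Dict Int Int) : PySem.Dict Int Int :=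
  nodos.foldl (fun c k => if PySem.Dict.getD c k 0 == b then c.insert k a else c) comp

def pvEdgeStep (nodos : List Int) (j : Int) (comp : PySem.Dict Int Int) (i : Int) :
    PySem.Dict Int Int :=
  if esPrimo (i + j) then
    let a := PySem.Dict.getD comp i 0
    let b := PySem.Dict.getD comp j 0
    if a != b then pvMerge nodos a b comp else comp
  else comp

def pvComp (minimo maximo : Int) : PySem.Dict Int Int :=
  let nodos := pvNodos minimo maximo
  let comp0 : PySem.Dict Int Int := nodos.foldl (fun d n => d.insert n n) PySem.Dict.empty
  (PySem.List.pyRange 0 nodos.length 1).foldl (fun comp idx =>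
    let j := PySem.List.pyGetD nodos idx 0
    (PySem.List.slice nodos none (some idx)).foldl (fun comp i => pvEdgeStep nodos j comp i) comp)
    comp0

def contarGrafosConexos_alt (minimo : Int) (maximo : Int) : Int :=
  ((PySem.Set.ofList (PySem.Dict.values (pvComp minimo maximo))).length : Int)

-- ===== PRECONDITION & SPEC =====
def Spec_contarGrafosConexos (minimo : Int) (maximo : Int) (out : Int) : Prop := out = contarGrafosConexos_alt minimo maximo
instance (minimo : Int) (maximo : Int) (out : Int) : Decidable (Spec_contarGrafosConexos minimo maximo out) := by unfold Spec_contarGrafosConexos; infer_instance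

-- ===== CLAIM (what is proved, stated in full; the proofs are below) =====
def Claim_equal_contarGrafosConexos : Prop := ∀ (minimo : Int) (maximo : Int), Dom_contarGrafosConexos minimo maximo → Spec_contarGrafosConexos minimo maximo (contarGrafosConexos minimo maximo)

-- ===== LEMMAS AND PROOFS =====

-- the edge relation of the graph both programs work on, and its connectivity closure
def pvAdj (minimo maximo : Int) (x y : Int) : Prop :=
  x ∈ pvNodos minimo maximo ∧ y ∈ pvNodos minimo maximo ∧ x ≠ y ∧ esPrimo (x + y) = true
def pvConn (minimo maximo : Int) : Int → Int → Prop := Relation.ReflTransGen (pvAdj minimo maximo)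
-- B's final label of a node
def pvLab (minimo maximo : Int) (n : Int) : Int := PySem.Dict.getD (pvComp minimo maximo) n 0
-- the symmetric relation generated by a list of candidate edges (prime-sum ones count)
def pvSRel (es : List (Int × Int)) (x y : Int) : Prop :=
  ∃ p ∈ es, esPrimo (p.1 + p.2) = true ∧ ((x, y) = p ∨ (y, x) = p)
-- the B-side loop invariant
def pvInv (minimo maximo : Int) (comp : PySem.Dict Int Int) (es : List (Int × Int)) : Prop :=
  PySem.Dict.keys comp = pvNodos minimo maximo ∧
  ∀ m ∈ pvNodos minimo maximo, ∀ n ∈ pvNodos minimo maximo,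
    (PySem.Dict.getD comp m 0 = PySem.Dict.getD comp n 0 ↔ Relation.ReflTransGen (pvSRel es) m n)

theorem pvSRel_symm (es : List (Int × Int)) : Symmetric (pvSRel es) := by
  intro x y ⟨p, hp, hpr, hxy⟩
  exact ⟨p, hp, hpr, hxy.symm.imp id id⟩

theorem nodup_pvNodos (minimo maximo : Int) : (pvNodos minimo maximo).Nodup := by
  exact PySem.List.nodup_pyRange_one _ _

theorem pairwise_pvNodos (minimo maximo : Int) : (pvNodos minimo maximo).Pairwise (· < ·) := by
  exact PySem.List.pairwise_lt_pyRange_one _ _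

-- reflexive-transitive closure of the empty relation is equality
theorem rtg_empty {x y : Int} (h : Relation.ReflTransGen (pvSRel []) x y) : x = y := by
  induction h with
  | refl => rfl
  | tail _ hstep _ => exact absurd hstep (by rintro ⟨p, hp, _⟩; simp at hp)

-- closure is invariant under pointwise-equivalent relations
theorem rtg_congr {r s : Int → Int → Prop} (h : ∀ x y, r x y ↔ s x y) {x y : Int}
    (hr : Relation.ReflTransGen r x y) : Relation.ReflTransGen s x y := by
  induction hr with
  | refl => exact Relation.ReflTransGen.refl
  | tail _ hstep ih => exact ih.tail ((h _ _).1 hstep)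

-- adding one edge (i, j) to a symmetric relation: the new closure in terms of the old one
theorem rtg_add_edge {r : Int → Int → Prop} (hsym : Symmetric r) (i j m n : Int) :
    Relation.ReflTransGen (fun x y => r x y ∨ ((x, y) = (i, j) ∨ (y, x) = (i, j))) m n ↔
      Relation.ReflTransGen r m n ∨
      (Relation.ReflTransGen r m i ∧ Relation.ReflTransGen r j n) ∨
      (Relation.ReflTransGen r m j ∧ Relation.ReflTransGen r i n) := by
  have mono : ∀ a b, Relation.ReflTransGen r a b →
      Relation.ReflTransGen (fun x y => r x y ∨ ((x, y) = (i, j) ∨ (y, x) = (i, j))) a b := by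
    intro a b hab
    exact Relation.ReflTransGen.mono (fun x y h => Or.inl h) hab
  have hsymC : ∀ a b, Relation.ReflTransGen r a b → Relation.ReflTransGen r b a :=
    fun a b h => Relation.ReflTransGen.symmetric hsym h
  constructor
  · intro h
    induction h with
    | refl => exact Or.inl Relation.ReflTransGen.refl
    | tail _ hstep ih =>
      rcases hstep with hr | hij | hij
      · rcases ih with h1 | ⟨h1, h2⟩ | ⟨h1, h2⟩
        · exact Or.inl (h1.tail hr)
        · exact Or.inr (Or.inl ⟨h1, h2.tail hr⟩)
        · exact Or.inr (Or.inr ⟨h1, h2.tail hr⟩)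
      · obtain ⟨hb, hc⟩ := Prod.mk.injEq .. ▸ hij
        subst hb; subst hc
        rcases ih with h1 | ⟨h1, h2⟩ | ⟨h1, h2⟩
        · exact Or.inr (Or.inl ⟨h1, Relation.ReflTransGen.refl⟩)
        · exact Or.inr (Or.inl ⟨h1, Relation.ReflTransGen.refl⟩)
        · exact Or.inl h1
      · obtain ⟨hb, hc⟩ := Prod.mk.injEq .. ▸ hij
        subst hb; subst hc
        rcases ih with h1 | ⟨h1, h2⟩ | ⟨h1, h2⟩
        · exact Or.inr (Or.inr ⟨h1, Relation.ReflTransGen.refl⟩)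
        · exact Or.inl h1
        · exact Or.inr (Or.inr ⟨h1, Relation.ReflTransGen.refl⟩)
  · rintro (h | ⟨h1, h2⟩ | ⟨h1, h2⟩)
    · exact mono _ _ h
    · exact ((mono _ _ h1).tail (Or.inr (Or.inl rfl))).trans (mono _ _ h2)
    · exact ((mono _ _ h1).tail (Or.inr (Or.inr rfl))).trans (mono _ _ h2)


theorem pvSRel_append_singleton (es : List (Int × Int)) (e : Int × Int) (x y : Int) :
    pvSRel (es ++ [e]) x y ↔
      pvSRel es x y ∨ (esPrimo (e.1 + e.2) = true ∧ ((x, y) = e ∨ (y, x) = e)) := by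
  constructor
  · rintro ⟨p, hp, hpr, hxy⟩
    rcases List.mem_append.1 hp with h | h
    · exact Or.inl ⟨p, h, hpr, hxy⟩
    · simp only [List.mem_singleton] at h
      subst h; exact Or.inr ⟨hpr, hxy⟩
  · rintro (⟨p, hp, hpr, hxy⟩ | ⟨hpr, hxy⟩)
    · exact ⟨p, List.mem_append.2 (Or.inl hp), hpr, hxy⟩
    · exact ⟨e, List.mem_append.2 (Or.inr (List.mem_singleton.2 rfl)), hpr, hxy⟩

-- B side: effect of pvMerge on lookups and keys
theorem pvMerge_getD (l : List Int) (a b : Int) (comp : PySem.Dict Int Int) (hl : l.Nodup)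
    (k : Int) :
    PySem.Dict.getD (pvMerge l a b comp) k 0 =
      if k ∈ l ∧ PySem.Dict.getD comp k 0 = b then a else PySem.Dict.getD comp k 0 := by
  induction l generalizing comp with
  | nil => simp [pvMerge]
  | cons x t ih =>
    obtain ⟨hx, ht⟩ := List.nodup_cons.1 hl
    show PySem.Dict.getD (pvMerge t a b
      (if (PySem.Dict.getD comp x 0 == b) = true then comp.insert x a else comp)) k 0 = _
    rw [ih _ ht]
    by_cases hkx : k = x
    · subst hkx
      simp only [List.mem_cons, beq_iff_eq]
      by_cases hb : PySem.Dict.getD comp k 0 = b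
      · simp [hb, hx, PySem.Dict.getD_insert_self]
      · simp [hb, hx]
    · have hne : PySem.Dict.getD (if (PySem.Dict.getD comp x 0 == b) = true
          then comp.insert x a else comp) k 0 = PySem.Dict.getD comp k 0 := by
        split
        · exact PySem.Dict.getD_insert_of_ne _ _ _ hkx
        · rfl
      rw [hne]
      simp [List.mem_cons, hkx]

theorem pvMerge_keys (l : List Int) (a b : Int) (comp : PySem.Dict Int Int)
    (h : ∀ x ∈ l, x ∈ PySem.Dict.keys comp) :
    PySem.Dict.keys (pvMerge l a b comp) = PySem.Dict.keys comp := by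
  induction l generalizing comp with
  | nil => rfl
  | cons x t ih =>
    have hx := h x (List.mem_cons_self ..)
    have hkeys : PySem.Dict.keys (if (PySem.Dict.getD comp x 0 == b) = true
        then comp.insert x a else comp) = PySem.Dict.keys comp := by
      split
      · exact PySem.Dict.keys_insert_of_contains _ _ ((PySem.Dict.contains_iff_mem_keys _ _).2 hx)
      · rfl
    show PySem.Dict.keys (pvMerge t a b _) = _
    rw [ih _ (by intro z hz; rw [hkeys]; exact h z (List.mem_cons_of_mem _ hz)), hkeys]

-- B side: one edge-processing step preserves the invariant
theorem pvEdgeStep_inv (minimo maximo : Int) (comp : PySem.Dict Int Int) (es : List (Int × Int))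
    (hinv : pvInv minimo maximo comp es) (i j : Int) (hi : i ∈ pvNodos minimo maximo)
    (hj : j ∈ pvNodos minimo maximo) (_hij : i ≠ j) :
    pvInv minimo maximo (pvEdgeStep (pvNodos minimo maximo) j comp i) (es ++ [(i, j)]) := by
  obtain ⟨hkeys, hcl⟩ := hinv
  by_cases hpr : esPrimo (i + j) = true
  · have hchar : ∀ m n : Int, Relation.ReflTransGen (pvSRel (es ++ [(i, j)])) m n ↔
        (Relation.ReflTransGen (pvSRel es) m n ∨
          (Relation.ReflTransGen (pvSRel es) m i ∧ Relation.ReflTransGen (pvSRel es) j n) ∨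
          (Relation.ReflTransGen (pvSRel es) m j ∧ Relation.ReflTransGen (pvSRel es) i n)) := by
      intro m n
      have hiff : ∀ x y : Int, pvSRel (es ++ [(i, j)]) x y ↔
          (fun x y => pvSRel es x y ∨ ((x, y) = (i, j) ∨ (y, x) = (i, j))) x y := by
        intro x y
        rw [pvSRel_append_singleton]
        simp [hpr]
      constructor
      · intro h
        exact (rtg_add_edge (pvSRel_symm es) i j m n).1 (rtg_congr hiff h)
      · intro h
        exact rtg_congr (fun x y => (hiff x y).symm) ((rtg_add_edge (pvSRel_symm es) i j m n).2 h)
    unfold pvEdgeStep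
    rw [if_pos hpr]
    by_cases hab : PySem.Dict.getD comp i 0 = PySem.Dict.getD comp j 0
    · have hCij : Relation.ReflTransGen (pvSRel es) i j := (hcl i hi j hj).1 hab
      have hCji : Relation.ReflTransGen (pvSRel es) j i :=
        Relation.ReflTransGen.symmetric (pvSRel_symm es) hCij
      simp only [bne, hab, beq_self_eq_true, Bool.not_true, if_neg Bool.false_ne_true]
      refine ⟨hkeys, fun m hm n hn => ?_⟩
      rw [hcl m hm n hn, hchar m n]
      constructor
      · exact Or.inl
      · rintro (h | ⟨h1, h2⟩ | ⟨h1, h2⟩)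
        · exact h
        · exact (h1.trans hCij).trans h2
        · exact (h1.trans hCji).trans h2
    · have hmerge := fun k => pvMerge_getD (pvNodos minimo maximo)
        (PySem.Dict.getD comp i 0) (PySem.Dict.getD comp j 0) comp
        (nodup_pvNodos minimo maximo) k
      rw [if_pos (by simp [bne, hab] :
        (PySem.Dict.getD comp i 0 != PySem.Dict.getD comp j 0) = true)]
      refine ⟨by
        rw [pvMerge_keys _ _ _ _ (by rw [hkeys]; exact fun x hx => hx), hkeys],
        fun m hm n hn => ?_⟩
      rw [hmerge m, hmerge n, hchar m n,
        ← hcl m hm n hn, ← hcl m hm i hi, ← hcl m hm j hj, ← hcl i hi n hn, ← hcl j hj n hn]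
      simp only [hm, hn, true_and]
      constructor
      · intro h
        split_ifs at h with h1 h2 h2 <;> omega
      · intro h
        split_ifs with h1 h2 h2 <;> omega
  · unfold pvEdgeStep
    rw [if_neg hpr]
    refine ⟨hkeys, fun m hm n hn => ?_⟩
    rw [hcl m hm n hn]
    have hiff : ∀ x y : Int, pvSRel es x y ↔ pvSRel (es ++ [(i, j)]) x y := by
      intro x y
      rw [pvSRel_append_singleton]
      simp [hpr]
    exact ⟨rtg_congr hiff, rtg_congr (fun x y => (hiff x y).symm)⟩

-- B side: the inner loop over a list of first endpoints
theorem pvInner_inv (minimo maximo : Int) (j : Int) (hj : j ∈ pvNodos minimo maximo) :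
    ∀ (is : List Int) (comp : PySem.Dict Int Int) (es : List (Int × Int)),
    (∀ i ∈ is, i ∈ pvNodos minimo maximo ∧ i ≠ j) → pvInv minimo maximo comp es →
    pvInv minimo maximo (is.foldl (fun c i => pvEdgeStep (pvNodos minimo maximo) j c i) comp)
      (es ++ is.map (fun i => (i, j))) := by
  intro is
  induction is with
  | nil => intro comp es _ h; simpa using h
  | cons x t ih =>
    intro comp es hmem hinv
    have hx := hmem x (List.mem_cons_self ..)
    have step := pvEdgeStep_inv minimo maximo comp es hinv x j hx.1 hj hx.2
    have := ih (pvEdgeStep (pvNodos minimo maximo) j comp x) (es ++ [(x, j)])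
      (fun i hi => hmem i (List.mem_cons_of_mem _ hi)) step
    simpa using this

-- B side: the initial labelling comp0
theorem pvFoldInsert_getD_not_mem (l : List Int) (d : PySem.Dict Int Int) (k : Int)
    (hk : k ∉ l) :
    PySem.Dict.getD (l.foldl (fun d n => d.insert n n) d) k 0 = PySem.Dict.getD d k 0 := by
  induction l generalizing d with
  | nil => rfl
  | cons x t ih =>
    show PySem.Dict.getD (t.foldl _ (d.insert x x)) k 0 = _
    rw [ih _ (fun h => hk (List.mem_cons_of_mem _ h)),
      PySem.Dict.getD_insert_of_ne _ _ _ (fun h => hk (by rw [h]; exact List.mem_cons_self ..))]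

theorem pvComp0_getD (minimo maximo : Int) (k : Int) (hk : k ∈ pvNodos minimo maximo) :
    PySem.Dict.getD
      ((pvNodos minimo maximo).foldl (fun d n => d.insert n n) PySem.Dict.empty) k 0 = k := by
  have main : ∀ (l : List Int) (d : PySem.Dict Int Int), l.Nodup → k ∈ l →
      PySem.Dict.getD (l.foldl (fun d n => d.insert n n) d) k 0 = k := by
    intro l
    induction l with
    | nil => intro d _ h; simp at h
    | cons x t ih =>
      intro d hnd hk
      obtain ⟨hx, ht⟩ := List.nodup_cons.1 hnd
      show PySem.Dict.getD (t.foldl _ (d.insert x x)) k 0 = k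
      rcases List.mem_cons.1 hk with h | h
      · subst h
        rw [pvFoldInsert_getD_not_mem _ _ _ hx, PySem.Dict.getD_insert_self]
      · exact ih _ ht h
  exact main _ _ (nodup_pvNodos minimo maximo) hk

theorem pvComp0_keys (minimo maximo : Int) :
    PySem.Dict.keys ((pvNodos minimo maximo).foldl (fun d n => d.insert n n) PySem.Dict.empty) =
      pvNodos minimo maximo := by
  rw [PySem.Dict.keys_foldl_insert]
  show PySem.Set.update PySem.Dict.empty.keys _ = _
  rw [PySem.Dict.keys_empty, PySem.Set.update_nil_left]
  exact PySem.Set.ofList_eq_self_of_nodup _ (nodup_pvNodos minimo maximo)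

-- B side: invariant holds after the whole double loop
def pvAllPairs (minimo maximo : Int) : List (Int × Int) :=
  (PySem.List.pyRange 0 (pvNodos minimo maximo).length 1).flatMap (fun idx =>
    ((pvNodos minimo maximo).take idx.toNat).map
      (fun i => (i, PySem.List.pyGetD (pvNodos minimo maximo) idx 0)))

theorem pvComp_inv (minimo maximo : Int) :
    pvInv minimo maximo (pvComp minimo maximo) (pvAllPairs minimo maximo) := by
  have hnd := nodup_pvNodos minimo maximo
  have hpw := pairwise_pvNodos minimo maximo
  have main : ∀ (idxs : List Int) (comp : PySem.Dict Int Int) (es : List (Int × Int)),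
      (∀ idx ∈ idxs, 0 ≤ idx ∧ idx < ((pvNodos minimo maximo).length : Int)) →
      pvInv minimo maximo comp es →
      pvInv minimo maximo
        (idxs.foldl (fun comp idx =>
          (PySem.List.slice (pvNodos minimo maximo) none (some idx)).foldl
            (fun comp i => pvEdgeStep (pvNodos minimo maximo)
              (PySem.List.pyGetD (pvNodos minimo maximo) idx 0) comp i) comp) comp)
        (es ++ idxs.flatMap (fun idx =>
          ((pvNodos minimo maximo).take idx.toNat).map
            (fun i => (i, PySem.List.pyGetD (pvNodos minimo maximo) idx 0)))) := by
    intro idxs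
    induction idxs with
    | nil => intro comp es _ h; simpa using h
    | cons idx t ih =>
      intro comp es hb hinv
      obtain ⟨h0, hlt⟩ := hb idx (List.mem_cons_self ..)
      have hlt' : idx.toNat < (pvNodos minimo maximo).length := by omega
      have hj : PySem.List.pyGetD (pvNodos minimo maximo) idx 0 =
          (pvNodos minimo maximo)[idx.toNat] :=
        PySem.List.pyGetD_eq_getElem _ _ h0 (by omega)
      have hjm : PySem.List.pyGetD (pvNodos minimo maximo) idx 0 ∈ pvNodos minimo maximo := by
        rw [hj]; exact List.getElem_mem _
      have hslice : PySem.List.slice (pvNodos minimo maximo) none (some idx) =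
          (pvNodos minimo maximo).take idx.toNat := PySem.List.slice_to _ h0
      have hmem : ∀ i ∈ (pvNodos minimo maximo).take idx.toNat,
          i ∈ pvNodos minimo maximo ∧ i ≠ PySem.List.pyGetD (pvNodos minimo maximo) idx 0 := by
        intro i hi
        obtain ⟨ki, hki, hieq⟩ := List.mem_take_iff_getElem.1 hi
        have hki' : ki < idx.toNat := by omega
        have hkil : ki < (pvNodos minimo maximo).length := by omega
        have hlt2 : (pvNodos minimo maximo)[ki] < (pvNodos minimo maximo)[idx.toNat] :=
          List.pairwise_iff_getElem.1 hpw ki idx.toNat (by omega) hlt' hki'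
        refine ⟨hieq ▸ List.getElem_mem _, ?_⟩
        rw [hj, ← hieq]
        omega
      have step := pvInner_inv minimo maximo _ hjm ((pvNodos minimo maximo).take idx.toNat)
        comp es hmem hinv
      have := ih _ _ (fun x hx => hb x (List.mem_cons_of_mem _ hx)) step
      simp only [List.foldl_cons, List.flatMap_cons]
      rw [← List.append_assoc, hslice]
      exact this
  have base : pvInv minimo maximo
      ((pvNodos minimo maximo).foldl (fun d n => d.insert n n) PySem.Dict.empty) [] := by
    refine ⟨pvComp0_keys minimo maximo, fun m hm n hn => ?_⟩
    rw [pvComp0_getD minimo maximo m hm, pvComp0_getD minimo maximo n hn]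
    constructor
    · intro h; subst h; exact Relation.ReflTransGen.refl
    · exact rtg_empty
  have hb : ∀ idx ∈ PySem.List.pyRange 0 ((pvNodos minimo maximo).length : Int) 1,
      0 ≤ idx ∧ idx < ((pvNodos minimo maximo).length : Int) := by
    intro idx hidx
    exact PySem.List.mem_pyRange_one.1 hidx
  have := main _ _ _ hb base
  simpa [pvComp, pvAllPairs] using this

-- the full pair list generates exactly the adjacency relation
theorem pvSRel_allPairs (minimo maximo : Int) (x y : Int) :
    pvSRel (pvAllPairs minimo maximo) x y ↔ pvAdj minimo maximo x y := by
  have hpw := pairwise_pvNodos minimo maximo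
  have hmem : ∀ p : Int × Int, p ∈ pvAllPairs minimo maximo ↔
      (p.1 ∈ pvNodos minimo maximo ∧ p.2 ∈ pvNodos minimo maximo ∧ p.1 < p.2) := by
    intro p
    constructor
    · intro hp
      obtain ⟨idx, hidx, hp⟩ := List.mem_flatMap.1 hp
      obtain ⟨h0, hlt⟩ := PySem.List.mem_pyRange_one.1 hidx
      have hlt' : idx.toNat < (pvNodos minimo maximo).length := by omega
      obtain ⟨i, hi, hieq⟩ := List.mem_map.1 hp
      obtain ⟨ki, hki, hkeq⟩ := List.mem_take_iff_getElem.1 hi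
      have hki' : ki < (pvNodos minimo maximo).length := by omega
      have hj : PySem.List.pyGetD (pvNodos minimo maximo) idx 0 =
          (pvNodos minimo maximo)[idx.toNat] := PySem.List.pyGetD_eq_getElem _ _ h0 (by omega)
      subst hieq
      refine ⟨hkeq ▸ List.getElem_mem _, by rw [hj]; exact List.getElem_mem _, ?_⟩
      show i < PySem.List.pyGetD (pvNodos minimo maximo) idx 0
      rw [hj, ← hkeq]
      exact List.pairwise_iff_getElem.1 hpw ki idx.toNat hki' hlt' (by omega)
    · rintro ⟨h1, h2, hlt⟩
      obtain ⟨ki, hki, hkeq⟩ := List.mem_iff_getElem.1 h1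
      obtain ⟨kj, hkj, hjeq⟩ := List.mem_iff_getElem.1 h2
      have hkk : ki < kj := by
        by_contra hcon
        rcases Nat.lt_or_ge kj ki with h | h
        · have := List.pairwise_iff_getElem.1 hpw kj ki hkj hki h
          omega
        · have : ki = kj := by omega
          subst this
          rw [hkeq] at hjeq
          omega
      refine List.mem_flatMap.2 ⟨(kj : Int), PySem.List.mem_pyRange_one.2 ⟨by omega, by omega⟩, ?_⟩
      refine List.mem_map.2 ⟨p.1, ?_, ?_⟩
      · refine List.mem_take_iff_getElem.2 ⟨ki, by simp; omega, ?_⟩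
        simpa using hkeq
      · have hj : PySem.List.pyGetD (pvNodos minimo maximo) ((kj : Nat) : Int) 0 =
            (pvNodos minimo maximo)[((kj : Nat) : Int).toNat] :=
          PySem.List.pyGetD_eq_getElem _ _ (by omega) (by omega)
        rw [hj]
        simp only [Int.toNat_natCast]
        rw [hjeq]

  constructor
  · rintro ⟨p, hp, hpr, hxy⟩
    obtain ⟨h1, h2, hlt⟩ := (hmem p).1 hp
    rcases hxy with h | h
    · obtain ⟨hx, hy⟩ := Prod.mk.injEq .. ▸ h
      subst hx; subst hy
      exact ⟨h1, h2, by omega, hpr⟩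
    · obtain ⟨hy, hx⟩ := Prod.mk.injEq .. ▸ h
      subst hx; subst hy
      exact ⟨h2, h1, by omega, by rwa [Int.add_comm]⟩
  · rintro ⟨hx, hy, hne, hpr⟩
    rcases lt_trichotomy x y with h | h | h
    · exact ⟨(x, y), (hmem (x, y)).2 ⟨hx, hy, h⟩, hpr, Or.inl rfl⟩
    · exact absurd h hne
    · exact ⟨(y, x), (hmem (y, x)).2 ⟨hy, hx, h⟩, by rwa [Int.add_comm] at hpr, Or.inr rfl⟩

-- B's labels classify connectivity
theorem pvLab_classifies (minimo maximo : Int) {m n : Int} (hm : m ∈ pvNodos minimo maximo)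
    (hn : n ∈ pvNodos minimo maximo) :
    pvLab minimo maximo m = pvLab minimo maximo n ↔ pvConn minimo maximo m n := by
  obtain ⟨hkeys, hcl⟩ := pvComp_inv minimo maximo
  rw [show pvLab minimo maximo m = PySem.Dict.getD (pvComp minimo maximo) m 0 from rfl,
    show pvLab minimo maximo n = PySem.Dict.getD (pvComp minimo maximo) n 0 from rfl,
    hcl m hm n hn]
  constructor
  · exact rtg_congr (fun x y => pvSRel_allPairs minimo maximo x y)
  · exact rtg_congr (fun x y => (pvSRel_allPairs minimo maximo x y).symm)

theorem pvComp_keys (minimo maximo : Int) :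
    PySem.Dict.keys (pvComp minimo maximo) = pvNodos minimo maximo := by
  exact (pvComp_inv minimo maximo).1

-- B's result
theorem alt_eq (minimo maximo : Int) :
    contarGrafosConexos_alt minimo maximo =
      ((PySem.Set.ofList ((pvNodos minimo maximo).map (pvLab minimo maximo))).length : Int) := by
  have hnd : (PySem.Dict.keys (pvComp minimo maximo)).Nodup := by
    rw [pvComp_keys]; exact nodup_pvNodos minimo maximo
  show ((PySem.Set.ofList (PySem.Dict.values (pvComp minimo maximo))).length : Int) = _
  rw [PySem.Dict.values_eq_map_keys _ hnd 0, pvComp_keys]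
  rfl

-- A side: the adjacency dict contains exactly the pvAdj neighbours
theorem pvGrafo0_getD (l : List Int) (d : PySem.Dict Int (PySem.Set Int))
    (hd : ∀ n, PySem.Dict.getD d n PySem.Set.empty = PySem.Set.empty) (n : Int) :
    PySem.Dict.getD (l.foldl (fun d n => d.insert n PySem.Set.empty) d) n PySem.Set.empty =
      PySem.Set.empty := by
  induction l generalizing d with
  | nil => exact hd n
  | cons x t ih =>
    refine ih _ (fun m => ?_)
    rw [PySem.Dict.getD_insert]
    split <;> [rfl; exact hd m]

theorem pvGrafoPairs_mem (ps : List (Int × Int)) :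
    ∀ (g : PySem.Dict Int (PySem.Set Int)) (n x : Int),
    x ∈ PySem.Dict.getD (ps.foldl (fun g p => pvGrafoPairStep g p.1 p.2) g) n PySem.Set.empty ↔
      x ∈ PySem.Dict.getD g n PySem.Set.empty ∨
      ∃ p ∈ ps, p.1 < p.2 ∧ esPrimo (p.1 + p.2) = true ∧
        ((n, x) = p ∨ (n, x) = (p.2, p.1)) := by
  induction ps with
  | nil => simp
  | cons q t ih =>
    intro g n x
    rw [List.foldl_cons, ih]
    have hstep : x ∈ PySem.Dict.getD (pvGrafoPairStep g q.1 q.2) n PySem.Set.empty ↔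
        x ∈ PySem.Dict.getD g n PySem.Set.empty ∨
        (q.1 < q.2 ∧ esPrimo (q.1 + q.2) = true ∧ ((n, x) = q ∨ (n, x) = (q.2, q.1))) := by
      unfold pvGrafoPairStep
      by_cases h1 : q.1 < q.2
      · by_cases h2 : esPrimo (q.1 + q.2) = true
        · rw [if_pos (by simp [h1, h2])]
          have hne : q.1 ≠ q.2 := by omega
          rw [PySem.Dict.getD_modify]
          by_cases hnj : n = q.2
          · rw [if_pos hnj, PySem.Set.mem_add, PySem.Dict.getD_modify,
              if_neg (by omega : ¬ q.2 = q.1)]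
            subst hnj
            constructor
            · rintro (h | h)
              · exact Or.inl h
              · exact Or.inr ⟨h1, h2, Or.inr (by rw [h])⟩
            · rintro (h | ⟨_, _, h | h⟩)
              · exact Or.inl h
              · exact absurd (congrArg Prod.fst h) (by simpa using hne.symm)
              · exact Or.inr (by simpa using congrArg Prod.snd h)
          · rw [if_neg hnj, PySem.Dict.getD_modify]
            by_cases hni : n = q.1
            · rw [if_pos hni, PySem.Set.mem_add]
              subst hni
              constructor
              · rintro (h | h)
                · exact Or.inl h
                · exact Or.inr ⟨h1, h2, Or.inl (by rw [h])⟩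
              · rintro (h | ⟨_, _, h | h⟩)
                · exact Or.inl h
                · exact Or.inr (by simpa using congrArg Prod.snd h)
                · exact absurd (congrArg Prod.fst h) (by simpa using hne)
            · rw [if_neg hni]
              constructor
              · exact Or.inl
              · rintro (h | ⟨_, _, h | h⟩)
                · exact h
                · exact absurd (congrArg Prod.fst h) (by simpa using hni)
                · exact absurd (congrArg Prod.fst h) (by simpa using hnj)
        · rw [if_neg (by simp [h2])]
          simp only [h2]
          tauto
      · rw [if_neg (by simp [h1])]
        simp only [h1]
        tauto
    rw [hstep]
    constructor
    · rintro (⟨h | hq⟩ | ⟨p, hp, hrest⟩)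
      · exact Or.inl h
      · exact Or.inr ⟨q, List.mem_cons_self .., hq⟩
      · exact Or.inr ⟨p, List.mem_cons_of_mem _ hp, hrest⟩
    · rintro (h | ⟨p, hp, hrest⟩)
      · exact Or.inl (Or.inl h)
      · rcases List.mem_cons.1 hp with h | h
        · subst h; exact Or.inl (Or.inr hrest)
        · exact Or.inr ⟨p, h, hrest⟩

theorem pvGrafo_mem (minimo maximo : Int) (n x : Int) :
    x ∈ PySem.Dict.getD (pvGrafo minimo maximo) n PySem.Set.empty ↔ pvAdj minimo maximo n x := by
  show x ∈ PySem.Dict.getD ((pvNodos minimo maximo).foldl (fun g i =>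
      (pvNodos minimo maximo).foldl (fun g j => pvGrafoPairStep g i j) g)
      ((pvNodos minimo maximo).foldl (fun d n => d.insert n PySem.Set.empty)
        PySem.Dict.empty)) n PySem.Set.empty ↔ _
  have hflat : ((pvNodos minimo maximo).flatMap (fun i =>
      (pvNodos minimo maximo).map (fun j => (i, j)))).foldl
        (fun g p => pvGrafoPairStep g p.1 p.2)
        ((pvNodos minimo maximo).foldl (fun d n => d.insert n PySem.Set.empty)
          PySem.Dict.empty) =
      (pvNodos minimo maximo).foldl (fun g i =>
        (pvNodos minimo maximo).foldl (fun g j => pvGrafoPairStep g i j) g)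
        ((pvNodos minimo maximo).foldl (fun d n => d.insert n PySem.Set.empty)
          PySem.Dict.empty) := by
    rw [List.foldl_flatMap]
    congr 1
    funext acc i
    rw [List.foldl_map]
  rw [← hflat, pvGrafoPairs_mem, pvGrafo0_getD _ _ (fun m => PySem.Dict.getD_empty ..)]
  constructor
  · rintro (h | ⟨p, hp, hlt, hpr, hnx⟩)
    · simp [PySem.Set.empty] at h
    · obtain ⟨i, hi, hmap⟩ := List.mem_flatMap.1 hp
      obtain ⟨j, hj, hje⟩ := List.mem_map.1 hmap
      obtain ⟨⟩ : p = (i, j) := hje.symm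
      
      rcases hnx with h | h
      · obtain ⟨he1, he2⟩ := Prod.mk.injEq .. ▸ h
        subst he1; subst he2
        exact ⟨hi, hj, by omega, hpr⟩
      · obtain ⟨he1, he2⟩ := Prod.mk.injEq .. ▸ h
        subst he1; subst he2
        exact ⟨hj, hi, by omega, by rwa [Int.add_comm]⟩
  · rintro ⟨hn, hx, hne, hpr⟩
    rcases lt_trichotomy n x with h | h | h
    · refine Or.inr ⟨(n, x), List.mem_flatMap.2 ⟨n, hn, List.mem_map.2 ⟨x, hx, rfl⟩⟩,
        h, hpr, Or.inl rfl⟩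
    · exact absurd h hne
    · refine Or.inr ⟨(x, n), List.mem_flatMap.2 ⟨x, hx, List.mem_map.2 ⟨n, hn, rfl⟩⟩,
        h, by rwa [Int.add_comm] at hpr, Or.inr rfl⟩

-- A side: the neighbour fold of one dfs iteration
theorem pvCountP_lt (l : List Int) (p q : Int → Bool) (h : ∀ a ∈ l, p a = true → q a = true)
    (x : Int) (hx : x ∈ l) (hqx : q x = true) (hpx : p x = false) :
    l.countP p < l.countP q := by
  induction l with
  | nil => simp at hx
  | cons w t ih =>
    rcases List.mem_cons.1 hx with hw | hw
    · subst hw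
      have : t.countP p ≤ t.countP q :=
        List.countP_mono_left (fun a ha => h a (List.mem_cons_of_mem _ ha))
      simp [hqx, hpx]
      omega
    · have hht := ih (fun a ha => h a (List.mem_cons_of_mem _ ha)) hw
      have hhw := h w (List.mem_cons_self ..)
      simp only [List.countP_cons]
      by_cases hpw : p w = true
      · simp [hpw, hhw hpw]; omega
      · simp only [Bool.not_eq_true] at hpw
        simp only [hpw]
        by_cases hqw : q w = true <;> simp [hqw] <;> omega

theorem pvNbFold_mem (nb : List Int) (rest : List Int) (vis : PySem.Set Int) :
    (∀ z, z ∈ (nb.foldl (fun (pv : List Int × PySem.Set Int) vecino =>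
        if PySem.Set.contains pv.2 vecino then pv
        else (vecino :: pv.1, PySem.Set.add pv.2 vecino)) (rest, vis)).2 ↔ z ∈ vis ∨ z ∈ nb) ∧
    (∀ p, p ∈ (nb.foldl (fun (pv : List Int × PySem.Set Int) vecino =>
        if PySem.Set.contains pv.2 vecino then pv
        else (vecino :: pv.1, PySem.Set.add pv.2 vecino)) (rest, vis)).1 ↔
        p ∈ rest ∨ (p ∈ nb ∧ p ∉ vis)) := by
  induction nb generalizing rest vis with
  | nil => simp
  | cons w t ih =>
    simp only [List.foldl_cons]
    by_cases hw : PySem.Set.contains vis w = true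
    · rw [if_pos hw]
      have hwm : w ∈ vis := (PySem.Set.contains_iff _ _).1 hw
      obtain ⟨ih1, ih2⟩ := ih rest vis
      constructor
      · intro z
        rw [ih1 z, List.mem_cons]
        constructor
        · rintro (h | h) <;> tauto
        · rintro (h | h | h)
          · tauto
          · subst h; tauto
          · tauto
      · intro p
        rw [ih2 p, List.mem_cons]
        constructor
        · rintro (h | h) <;> tauto
        · rintro (h | ⟨(h1 | h1), h2⟩)
          · tauto
          · subst h1; exact absurd hwm h2
          · tauto
    · rw [if_neg hw]
      have hwm : w ∉ vis := fun hm => hw ((PySem.Set.contains_iff _ _).2 hm)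
      obtain ⟨ih1, ih2⟩ := ih (w :: rest) (PySem.Set.add vis w)
      constructor
      · intro z
        rw [ih1 z, PySem.Set.mem_add, List.mem_cons]
        tauto
      · intro p
        rw [ih2 p, List.mem_cons, List.mem_cons, PySem.Set.mem_add]
        by_cases hpw : p = w
        · subst hpw; tauto
        · tauto

theorem pvNbFold_measure (minimo maximo : Int) (nb : List Int)
    (hnb : ∀ z ∈ nb, z ∈ pvNodos minimo maximo) (rest : List Int) (vis : PySem.Set Int) :
    (nb.foldl (fun (pv : List Int × PySem.Set Int) vecino =>
        if PySem.Set.contains pv.2 vecino then pv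
        else (vecino :: pv.1, PySem.Set.add pv.2 vecino)) (rest, vis)).1.length +
      (pvNodos minimo maximo).countP (fun y => !(PySem.Set.contains
        (nb.foldl (fun (pv : List Int × PySem.Set Int) vecino =>
          if PySem.Set.contains pv.2 vecino then pv
          else (vecino :: pv.1, PySem.Set.add pv.2 vecino)) (rest, vis)).2 y)) ≤
    rest.length + (pvNodos minimo maximo).countP (fun y => !(PySem.Set.contains vis y)) := by
  induction nb generalizing rest vis with
  | nil => simp
  | cons w t ih =>
    simp only [List.foldl_cons]
    by_cases hw : PySem.Set.contains vis w = true
    · rw [if_pos hw]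
      exact ih (fun z hz => hnb z (List.mem_cons_of_mem _ hz)) rest vis
    · rw [if_neg hw]
      have hwm : w ∉ vis := fun hm => hw ((PySem.Set.contains_iff _ _).2 hm)
      have hcnt : (pvNodos minimo maximo).countP
          (fun y => !(PySem.Set.contains (PySem.Set.add vis w) y)) <
          (pvNodos minimo maximo).countP (fun y => !(PySem.Set.contains vis y)) := by
        refine pvCountP_lt _ _ _ (fun a _ ha => ?_) w (hnb w (List.mem_cons_self ..))
          (by simp [hwm]) (by simp [PySem.Set.mem_add])
        simp only [Bool.not_eq_true', ← Bool.not_eq_true] at ha ⊢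
        intro hmm
        exact ha ((PySem.Set.contains_iff _ _).2 ((PySem.Set.mem_add _ _ _).2 (Or.inl
          ((PySem.Set.contains_iff _ _).1 hmm))))
      have := ih (fun z hz => hnb z (List.mem_cons_of_mem _ hz)) (w :: rest)
        (PySem.Set.add vis w)
      simp only [List.length_cons] at this ⊢
      omega

-- A side: the dfs loop — what the visited set becomes
theorem pvDfs_spec (minimo maximo : Int) (n0 : Int) :
    ∀ (fuel : Nat) (pila : List Int) (vis : PySem.Set Int),
    pila.length + (pvNodos minimo maximo).countP (fun y => !(PySem.Set.contains vis y)) ≤ fuel →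
    (∀ p ∈ pila, p ∈ vis ∧ pvConn minimo maximo n0 p) →
    (∀ v ∈ vis, v ∈ pila ∨ ∀ x, pvAdj minimo maximo v x → x ∈ vis) →
    (∀ v ∈ vis, v ∈ pvDfs (pvGrafo minimo maximo) fuel pila vis) ∧
    (∀ v ∈ pvDfs (pvGrafo minimo maximo) fuel pila vis, v ∈ vis ∨ pvConn minimo maximo n0 v) ∧
    (∀ v ∈ pvDfs (pvGrafo minimo maximo) fuel pila vis, ∀ x, pvAdj minimo maximo v x →
      x ∈ pvDfs (pvGrafo minimo maximo) fuel pila vis) := by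
  intro fuel
  induction fuel with
  | zero =>
    intro pila vis hm hp hc
    have hnil : pila = [] := List.eq_nil_of_length_eq_zero (by omega)
    subst hnil
    refine ⟨fun v hv => hv, fun v hv => Or.inl hv, fun v hv x hadj => ?_⟩
    rcases hc v hv with h | h
    · simp at h
    · exact h x hadj
  | succ fuel ih =>
    intro pila vis hm hp hc
    cases pila with
    | nil =>
      refine ⟨fun v hv => hv, fun v hv => Or.inl hv, fun v hv x hadj => ?_⟩
      rcases hc v hv with h | h
      · simp at h
      · exact h x hadj
    | cons n rest =>
      obtain ⟨hst2, hst1⟩ := pvNbFold_mem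
        (PySem.Dict.getD (pvGrafo minimo maximo) n PySem.Set.empty) rest vis
      have hnb : ∀ z ∈ PySem.Dict.getD (pvGrafo minimo maximo) n PySem.Set.empty,
          z ∈ pvNodos minimo maximo := by
        intro z hz
        exact ((pvGrafo_mem minimo maximo n z).1 hz).2.1
      have hmeas := pvNbFold_measure minimo maximo _ hnb rest vis
      obtain ⟨hnvis, hnconn⟩ := hp n (List.mem_cons_self ..)
      set st := ((PySem.Dict.getD (pvGrafo minimo maximo) n PySem.Set.empty).foldl
        (fun (pv : List Int × PySem.Set Int) vecino =>
          if PySem.Set.contains pv.2 vecino then pv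
          else (vecino :: pv.1, PySem.Set.add pv.2 vecino)) (rest, vis)) with hstdef
      have hred : pvDfs (pvGrafo minimo maximo) (fuel + 1) (n :: rest) vis =
          pvDfs (pvGrafo minimo maximo) fuel st.1 st.2 := rfl
      rw [hred]
      have hm' : st.1.length + (pvNodos minimo maximo).countP
          (fun y => !(PySem.Set.contains st.2 y)) ≤ fuel := by
        simp only [List.length_cons] at hm
        omega
      have hp' : ∀ p ∈ st.1, p ∈ st.2 ∧ pvConn minimo maximo n0 p := by
        intro p hps
        rcases (hst1 p).1 hps with h | ⟨h1, h2⟩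
        · obtain ⟨hv, hcn⟩ := hp p (List.mem_cons_of_mem _ h)
          exact ⟨(hst2 p).2 (Or.inl hv), hcn⟩
        · exact ⟨(hst2 p).2 (Or.inr h1),
            hnconn.tail ((pvGrafo_mem minimo maximo n p).1 h1)⟩
      have hc' : ∀ v ∈ st.2, v ∈ st.1 ∨
          ∀ x, pvAdj minimo maximo v x → x ∈ st.2 := by
        intro v hv
        rcases (hst2 v).1 hv with h | h
        · rcases hc v h with hpl | hcl
          · rcases List.mem_cons.1 hpl with he | he
            · subst he
              refine Or.inr (fun x hadj => (hst2 x).2 (Or.inr ?_))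
              exact (pvGrafo_mem minimo maximo v x).2 hadj
            · exact Or.inl ((hst1 v).2 (Or.inl he))
          · exact Or.inr (fun x hadj => (hst2 x).2 (Or.inl (hcl x hadj)))
        · by_cases hvv : v ∈ vis
          · rcases hc v hvv with hpl | hcl
            · rcases List.mem_cons.1 hpl with he | he
              · subst he
                refine Or.inr (fun x hadj => (hst2 x).2 (Or.inr ?_))
                exact (pvGrafo_mem minimo maximo v x).2 hadj
              · exact Or.inl ((hst1 v).2 (Or.inl he))
            · exact Or.inr (fun x hadj => (hst2 x).2 (Or.inl (hcl x hadj)))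
          · exact Or.inl ((hst1 v).2 (Or.inr ⟨h, hvv⟩))
      obtain ⟨c1, c2, c3⟩ := ih st.1 st.2 hm' hp' hc'
      refine ⟨fun v hv => c1 v ((hst2 v).2 (Or.inl hv)), fun v hv => ?_, c3⟩
      rcases c2 v hv with h | h
      · rcases (hst2 v).1 h with h' | h'
        · exact Or.inl h'
        · exact Or.inr (hnconn.tail ((pvGrafo_mem minimo maximo n v).1 h'))
      · exact Or.inr h

-- A side: one complete dfs call from an unvisited root
theorem pvDfs_call (minimo maximo : Int) (n0 : Int) (V0 : PySem.Set Int)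
    (hV0 : ∀ v ∈ V0, ∀ x, pvAdj minimo maximo v x → x ∈ V0) :
    (∀ z, z ∈ pvDfs (pvGrafo minimo maximo) ((pvNodos minimo maximo).length + 1) [n0]
        (PySem.Set.add V0 n0) ↔ z ∈ V0 ∨ pvConn minimo maximo n0 z) := by
  obtain ⟨c1, c2, c3⟩ := pvDfs_spec minimo maximo n0 ((pvNodos minimo maximo).length + 1)
    [n0] (PySem.Set.add V0 n0)
    (by
      have := List.countP_le_length
        (p := fun y => !(PySem.Set.contains (PySem.Set.add V0 n0) y)) (l := pvNodos minimo maximo)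
      simp only [List.length_cons, List.length_nil]
      omega)
    (by
      intro p hp
      rcases List.mem_cons.1 hp with h | h
      · subst h
        exact ⟨(PySem.Set.mem_add _ _ _).2 (Or.inr rfl), Relation.ReflTransGen.refl⟩
      · simp at h)
    (by
      intro v hv
      rcases (PySem.Set.mem_add _ _ _).1 hv with h | h
      · exact Or.inr (fun x hadj => (PySem.Set.mem_add _ _ _).2 (Or.inl (hV0 v h x hadj)))
      · exact Or.inl (by rw [h]; exact List.mem_cons_self ..))
  intro z
  constructor
  · intro hz
    rcases c2 z hz with h | h
    · rcases (PySem.Set.mem_add _ _ _).1 h with h' | h'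
      · exact Or.inl h'
      · exact Or.inr (h' ▸ Relation.ReflTransGen.refl)
    · exact Or.inr h
  · intro hz
    rcases hz with h | h
    · exact c1 z ((PySem.Set.mem_add _ _ _).2 (Or.inl h))
    · induction h with
      | refl => exact c1 n0 ((PySem.Set.mem_add _ _ _).2 (Or.inr rfl))
      | tail h1 hstep ih => exact c3 _ ih _ hstep

-- A side: the outer loop, counting one per fresh component
theorem pvOuter (minimo maximo : Int) :
    ∀ (suffix pref : List Int), pvNodos minimo maximo = pref ++ suffix →
    ∀ (vis : PySem.Set Int) (c : Int),
    (∀ x, x ∈ vis ↔ ∃ m ∈ pref, pvConn minimo maximo m x) →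
    c = ((PySem.Set.ofList (pref.map (pvLab minimo maximo))).length : Int) →
    (suffix.foldl (fun (vc : PySem.Set Int × Int) nodo =>
      if PySem.Set.contains vc.1 nodo then vc
      else (pvDfs (pvGrafo minimo maximo) ((pvNodos minimo maximo).length + 1) [nodo]
        (PySem.Set.add vc.1 nodo), vc.2 + 1)) (vis, c)).2 =
      ((PySem.Set.ofList ((pvNodos minimo maximo).map (pvLab minimo maximo))).length : Int) := by
  intro suffix
  induction suffix with
  | nil =>
    intro pref h vis c hvis hc
    have hpref : pref = pvNodos minimo maximo := by rw [h, List.append_nil]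
    subst hpref
    simpa using hc
  | cons n t ih =>
    intro pref h vis c hvis hc
    have hn_nodos : n ∈ pvNodos minimo maximo := by
      rw [h]; exact List.mem_append.2 (Or.inr (List.mem_cons_self ..))
    have hpref_sub : ∀ m ∈ pref, m ∈ pvNodos minimo maximo := by
      intro m hm; rw [h]; exact List.mem_append.2 (Or.inl hm)
    have h' : pvNodos minimo maximo = (pref ++ [n]) ++ t := by
      rw [h, List.append_assoc]; rfl
    simp only [List.foldl_cons]
    by_cases hn : PySem.Set.contains vis n = true
    · rw [if_pos hn]
      have hnm : n ∈ vis := (PySem.Set.contains_iff _ _).1 hn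
      obtain ⟨m0, hm0, hconn0⟩ := (hvis n).1 hnm
      refine ih (pref ++ [n]) h' vis c (fun x => ?_) ?_
      · rw [hvis x]
        constructor
        · rintro ⟨m, hm, hcm⟩
          exact ⟨m, List.mem_append.2 (Or.inl hm), hcm⟩
        · rintro ⟨m, hm, hcm⟩
          rcases List.mem_append.1 hm with hh | hh
          · exact ⟨m, hh, hcm⟩
          · simp only [List.mem_singleton] at hh
            subst hh
            exact ⟨m0, hm0, hconn0.trans hcm⟩
      · rw [hc]
        congr 1
        rw [List.map_append, List.map_singleton, PySem.Set.ofList_append_singleton,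
          PySem.Set.add_of_mem]
        rw [PySem.Set.mem_ofList, List.mem_map]
        exact ⟨m0, hm0, ((pvLab_classifies minimo maximo (hpref_sub m0 hm0) hn_nodos).2
          hconn0)⟩
    · rw [if_neg hn]
      have hnm : n ∉ vis := fun hm => hn ((PySem.Set.contains_iff _ _).2 hm)
      have hclosed : ∀ v ∈ vis, ∀ x, pvAdj minimo maximo v x → x ∈ vis := by
        intro v hv x hadj
        obtain ⟨m, hm, hcm⟩ := (hvis v).1 hv
        exact (hvis x).2 ⟨m, hm, hcm.tail hadj⟩
      have hcall := pvDfs_call minimo maximo n vis hclosed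
      refine ih (pref ++ [n]) h' _ (c + 1) (fun x => ?_) ?_
      · rw [hcall x]
        constructor
        · rintro (hx | hx)
          · obtain ⟨m, hm, hcm⟩ := (hvis x).1 hx
            exact ⟨m, List.mem_append.2 (Or.inl hm), hcm⟩
          · exact ⟨n, List.mem_append.2 (Or.inr (List.mem_cons_self ..)), hx⟩
        · rintro ⟨m, hm, hcm⟩
          rcases List.mem_append.1 hm with hh | hh
          · exact Or.inl ((hvis x).2 ⟨m, hh, hcm⟩)
          · simp only [List.mem_singleton] at hh
            subst hh
            exact Or.inr hcm
      · rw [hc]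
        rw [List.map_append, List.map_singleton, PySem.Set.ofList_append_singleton,
          PySem.Set.add_of_not_mem]
        · rw [List.length_append, List.length_singleton]
          push_cast
          ring
        · rw [PySem.Set.mem_ofList, List.mem_map]
          rintro ⟨m, hm, heq⟩
          have hcmn := (pvLab_classifies minimo maximo (hpref_sub m hm) hn_nodos).1 heq
          exact hnm ((hvis n).2 ⟨m, hm, hcmn⟩)

-- ===== VERDICT (by name: the statement is the Claim_ definition above) =====
theorem contarGrafosConexos_spec : Claim_equal_contarGrafosConexos := by
  intro minimo maximo _
  unfold Spec_contarGrafosConexos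
  rw [alt_eq]
  show (((pvNodos minimo maximo)).foldl _ (PySem.Set.empty, 0)).2 = _
  exact pvOuter minimo maximo (pvNodos minimo maximo) [] rfl PySem.Set.empty 0
    (by intro x; simp [PySem.Set.empty]) (by simp)
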